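-- pv_equiv track=rewrite | github.com/bipins867/Python-Server-Clinet-Remote-Controlling | myStringLib2.py | checkCloserPos
-- ===== SOURCE A (Python) =====
-- def checkCloserPos(posArr):
--     posArr.sort()
--     cond=None
--     for i in range(0,len(posArr)):
--         d=posArr[i]
--
--         if(d-1 in posArr or d+1 in posArr):
--             cond= True
--             break
--         else:
--             cond= False
--
--     return cond
-- ===== SOURCE B (Python) =====
-- def checkCloserPos(posArr):
--     posArr.sort()
--     if not posArr:
--         return None
--     for k in range(len(posArr) - 1):
--         if posArr[k + 1] - posArr[k] == 1:
--             return True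
--     return False
-- ===== Notes on version B (the rewrite author's own statement) =====
-- stated objective: faster
-- what changed: Replaces per-element whole-list membership tests (d-1 in posArr or d+1 in posArr) by a single linear scan of adjacent differences over the sorted list, which suffices because a pair differing by 1 exists iff some adjacent sorted pair differs by 1.
import Mathlib
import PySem

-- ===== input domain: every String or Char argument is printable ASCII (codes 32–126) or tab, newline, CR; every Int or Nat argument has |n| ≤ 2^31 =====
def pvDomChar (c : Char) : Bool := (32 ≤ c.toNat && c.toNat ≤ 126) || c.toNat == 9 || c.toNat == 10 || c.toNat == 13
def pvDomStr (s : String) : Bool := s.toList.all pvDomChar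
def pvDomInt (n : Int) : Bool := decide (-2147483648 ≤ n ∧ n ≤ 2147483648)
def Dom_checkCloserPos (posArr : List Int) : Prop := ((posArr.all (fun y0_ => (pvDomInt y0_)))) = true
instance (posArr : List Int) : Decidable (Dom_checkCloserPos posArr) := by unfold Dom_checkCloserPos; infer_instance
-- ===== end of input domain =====

-- B replaces A's per-element whole-list membership tests by one adjacent-difference scan
-- of the sorted list (faster). Both A and B sort posArr in place; the equivalence proved
-- here is about the RETURN value.

-- ===== PORT A =====
-- the for-loop over range(len(posArr)) reading posArr[i], with cond carried and break on a hit
def checkCloserPosLoop (s : List Int) (c : Option Bool) : List Int → Option Bool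
  | [] => c
  | d :: rest =>
      if s.contains (d - 1) || s.contains (d + 1) then some true
      else checkCloserPosLoop s (some false) rest

def checkCloserPos (posArr : List Int) : Option Bool :=
  let s := PySem.List.sorted posArr (fun x => x) false
  checkCloserPosLoop s none s

-- ===== PORT B =====
-- the for-loop over range(len(posArr)-1) comparing posArr[k+1]-posArr[k] with 1
def checkCloserPosScan : List Int → Bool
  | a :: b :: rest => if b - a == 1 then true else checkCloserPosScan (b :: rest)
  | _ => false

def checkCloserPos_alt (posArr : List Int) : Option Bool :=
  let s := PySem.List.sorted posArr (fun x => x) false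
  if s.isEmpty then none else some (checkCloserPosScan s)

-- ===== PRECONDITION & SPEC =====
def Spec_checkCloserPos (posArr : List Int) (out : Option Bool) : Prop := out = checkCloserPos_alt posArr
instance (posArr : List Int) (out : Option Bool) : Decidable (Spec_checkCloserPos posArr out) := by unfold Spec_checkCloserPos; infer_instance

-- ===== CLAIM (what is proved, stated in full; the proofs are below) =====
def Claim_equal_checkCloserPos : Prop := ∀ (posArr : List Int), Dom_checkCloserPos posArr → Spec_checkCloserPos posArr (checkCloserPos posArr)

-- ===== LEMMAS AND PROOFS =====

-- A's loop, characterised: first hit gives `some true`; a completed nonempty loop gives `some false`.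
theorem loopA_eq (s : List Int) (c : Option Bool) (l : List Int) :
    checkCloserPosLoop s c l =
      if l.any (fun d => s.contains (d - 1) || s.contains (d + 1)) then some true
      else if l.isEmpty then c else some false := by
  induction l generalizing c with
  | nil => simp [checkCloserPosLoop]
  | cons d rest ih =>
      simp only [checkCloserPosLoop, List.any_cons]
      by_cases h : (s.contains (d - 1) || s.contains (d + 1)) = true
      · simp only [h]
        simp
      · have hb : (s.contains (d - 1) || s.contains (d + 1)) = false := by simpa using h
        simp only [hb, Bool.false_or, Bool.false_eq_true, if_false, ih]
        cases rest with
        | nil => simp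
        | cons b r =>
            by_cases ha : ((b :: r).any fun d => s.contains (d - 1) || s.contains (d + 1)) = true
            · simp only [ha]
              simp
            · simp

-- on a sorted list, x and x+1 both present force an adjacent pair with difference 1
theorem scan_of_mem (s : List Int) (hp : s.Pairwise (· ≤ ·)) (x : Int)
    (hx : x ∈ s) (hx1 : x + 1 ∈ s) : checkCloserPosScan s = true := by
  induction s with
  | nil => cases hx
  | cons a t ih =>
      have hpt : t.Pairwise (· ≤ ·) := (List.pairwise_cons.mp hp).2
      have hle : ∀ b ∈ t, a ≤ b := (List.pairwise_cons.mp hp).1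
      rcases List.mem_cons.mp hx with rfl | hxt
      · -- x = a; a+1 ∈ a :: t, and a+1 ≠ a, so a+1 ∈ t
        have hx1t : x + 1 ∈ t := by
          rcases List.mem_cons.mp hx1 with h | h
          · omega
          · exact h
        cases t with
        | nil => cases hx1t
        | cons b r =>
            have hab : x ≤ b := hle b List.mem_cons_self
            have hble : ∀ y ∈ r, b ≤ y := (List.pairwise_cons.mp hpt).1
            by_cases hb : b = x + 1
            · simp [checkCloserPosScan, hb]
            · -- then x+1 ∈ r, so b ≤ x+1, hence b = x
              have hx1r : x + 1 ∈ r := by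
                rcases List.mem_cons.mp hx1t with h | h
                · omega
                · exact h
              have : b ≤ x + 1 := hble _ hx1r
              have hbx : b = x := by omega
              have := ih hpt (by simp [hbx]) (List.mem_cons_of_mem _ hx1r)
              simp only [checkCloserPosScan]
              split <;> simp_all
      · rcases List.mem_cons.mp hx1 with h | hx1t
        · -- x + 1 = a, but a ≤ x: contradiction
          have := hle x hxt; omega
        · have := ih hpt hxt hx1t
          cases t with
          | nil => cases hxt
          | cons b r =>
              simp only [checkCloserPosScan]
              split <;> simp_all

-- an adjacent pair with difference 1 yields x and x+1 both in the list
theorem mem_of_scan (s : List Int) (h : checkCloserPosScan s = true) :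
    ∃ x ∈ s, x + 1 ∈ s := by
  induction s with
  | nil => simp [checkCloserPosScan] at h
  | cons a t ih =>
      cases t with
      | nil => simp [checkCloserPosScan] at h
      | cons b r =>
          simp only [checkCloserPosScan] at h
          by_cases hb : b - a == 1
          · refine ⟨a, List.mem_cons_self, ?_⟩
            have : b = a + 1 := by have := beq_iff_eq.mp hb; omega
            simp [← this]
          · simp only [hb] at h
            obtain ⟨x, hx, hx1⟩ := ih h
            exact ⟨x, List.mem_cons_of_mem _ hx, List.mem_cons_of_mem _ hx1⟩

-- A's hit condition over the whole sorted list equals B's adjacent scan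
theorem any_eq_scan (s : List Int) (hp : s.Pairwise (· ≤ ·)) :
    s.any (fun d => s.contains (d - 1) || s.contains (d + 1)) = checkCloserPosScan s := by
  by_cases h : checkCloserPosScan s = true
  · obtain ⟨x, hx, hx1⟩ := mem_of_scan s h
    rw [h, List.any_eq_true]
    exact ⟨x, hx, by simp [hx1]⟩
  · rw [Bool.not_eq_true] at h
    rw [h, Bool.eq_false_iff]
    intro hany
    obtain ⟨d, hd, hcond⟩ := List.any_eq_true.mp hany
    rcases Bool.or_eq_true_iff.mp hcond with hc | hc
    · have hm : d - 1 ∈ s := List.contains_iff_mem.mp hc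
      have := scan_of_mem s hp (d - 1) hm (by simpa using hd)
      simp [this] at h
    · have hm : d + 1 ∈ s := List.contains_iff_mem.mp hc
      have := scan_of_mem s hp d hd hm
      simp [this] at h

-- ===== VERDICT (by name: the statement is the Claim_ definition above) =====
theorem checkCloserPos_spec : Claim_equal_checkCloserPos := by
  intro posArr _
  unfold Spec_checkCloserPos checkCloserPos checkCloserPos_alt
  set s := PySem.List.sorted posArr (fun x => x) false with hs
  have hp : s.Pairwise (· ≤ ·) := by
    simpa using PySem.List.sorted_pairwise (xs := posArr) (key := fun x => x)
  rw [loopA_eq, any_eq_scan s hp]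
  cases s with
  | nil => simp [checkCloserPosScan]
  | cons a t =>
      by_cases h : checkCloserPosScan (a :: t) = true <;> simp_all
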